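-- pv_equiv track=rewrite | github.com/daniel-reich/turbo-robot | exeY2wDuEW4rFeYvL_9.py | ordered_matrix
-- ===== SOURCE A (Python) =====
-- def ordered_matrix(height, width):
--   matrix = []
--   Neo = 0
--   TAA = 0 #(Thomas A. Anderson)
--   #Get it?
--   Number = 1
--   while(Neo < height):
--     matrix.append([])
--     Neo = Neo + 1
--   Neo = 0
--   while(Neo < height):
--     while(TAA < width):
--       matrix[Neo].append(Number)
--       TAA = TAA + 1
--       Number = Number + 1
--     TAA = 0
--     Neo = Neo + 1
--   return(matrix)
-- ===== SOURCE B (Python) =====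
-- def ordered_matrix(height, width):
--     return [list(range(r * width + 1, r * width + width + 1)) for r in range(height)]
-- ===== Notes on version B (the rewrite author's own statement) =====
-- stated objective: idiomatic
-- what changed: A pre-allocates empty rows and then fills them in a second pair of while loops driven by a running counter Number; B keeps no running state and builds each row directly as list(range(r*width+1, r*width+width+1)), a closed form of the row's contents derived from its index.
import Mathlib
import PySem

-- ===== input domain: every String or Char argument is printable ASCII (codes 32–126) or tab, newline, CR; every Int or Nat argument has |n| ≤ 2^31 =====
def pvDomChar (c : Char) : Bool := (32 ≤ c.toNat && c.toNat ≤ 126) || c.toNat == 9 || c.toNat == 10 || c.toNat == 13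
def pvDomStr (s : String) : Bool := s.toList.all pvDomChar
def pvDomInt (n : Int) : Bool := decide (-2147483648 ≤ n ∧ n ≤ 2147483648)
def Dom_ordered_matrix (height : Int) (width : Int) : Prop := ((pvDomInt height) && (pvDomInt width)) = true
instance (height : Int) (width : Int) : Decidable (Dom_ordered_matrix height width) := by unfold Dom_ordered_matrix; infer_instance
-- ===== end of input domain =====

-- B replaces A's two-phase mutation with a threaded counter by a comprehension that
-- builds each row as list(range(r*width+1, r*width+width+1)) — each row computed in
-- closed form from its index, no running state; simpler and more idiomatic.

-- ===== PORT A =====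
-- Each while loop is ported as structural recursion on a fuel equal to its exact
-- remaining iteration count ((bound - counter).toNat); the loop condition stays inside.
-- In-place mutation is encoded exactly: row.append(x) as a reversed accumulator
-- (reversed once when the loop exits), and the matrix[Neo] updates of the outer loop
-- as a (processed-reversed, remaining) zipper over the row list — same iteration
-- order, same appended values, same result as the Python on every input.

-- first while loop: while Neo < height: matrix.append([])
def omLoop1 : Nat → Int → Int → List (List Int)
  | 0, _, _ => []
  | n + 1, height, Neo => if Neo < height then [] :: omLoop1 n height (Neo + 1) else []

-- inner while loop: while TAA < width: matrix[Neo].append(Number); TAA += 1; Number += 1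
-- (the row being mutated is carried reversed; returned with the final Number)
def omLoop3 : Nat → Int → Int → Int → List Int → List Int × Int
  | 0, _, _, Number, rowRev => (rowRev.reverse, Number)
  | n + 1, width, TAA, Number, rowRev =>
    if TAA < width then omLoop3 n width (TAA + 1) (Number + 1) (Number :: rowRev)
    else (rowRev.reverse, Number)

-- outer while loop of the second phase; matrix = done.reverse ++ rest, the row at
-- index Neo is the head of rest (omLoop1 made exactly 'height' rows, so rest is
-- never empty while Neo < height — the [] branch is unreachable)
def omLoop2 : Nat → Int → Int → Int → Int → List (List Int) → List (List Int) → List (List Int)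
  | 0, _, _, _, _, done, rest => done.reverse ++ rest
  | n + 1, height, width, Neo, Number, done, rest =>
    if Neo < height then
      match rest with
      | [] => done.reverse
      | row :: rest' =>
        let p := omLoop3 (width - 0).toNat width 0 Number row.reverse
        omLoop2 n height width (Neo + 1) p.2 (p.1 :: done) rest'
    else done.reverse ++ rest

def ordered_matrix (height : Int) (width : Int) : List (List Int) :=
  omLoop2 (height - 0).toNat height width 0 1 [] (omLoop1 (height - 0).toNat height 0)

-- ===== PORT B =====
def ordered_matrix_alt (height : Int) (width : Int) : List (List Int) :=
  (List.range height.toNat).map (fun r : Nat =>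
    PySem.List.pyRange ((r : Int) * width + 1) ((r : Int) * width + width + 1) 1)

-- ===== PRECONDITION & SPEC =====
def Spec_ordered_matrix (height : Int) (width : Int) (out : List (List Int)) : Prop := out = ordered_matrix_alt height width
instance (height : Int) (width : Int) (out : List (List Int)) : Decidable (Spec_ordered_matrix height width out) := by unfold Spec_ordered_matrix; infer_instance

-- ===== CLAIM (what is proved, stated in full; the proofs are below) =====
def Claim_equal_ordered_matrix : Prop := ∀ (height : Int) (width : Int), Dom_ordered_matrix height width → Spec_ordered_matrix height width (ordered_matrix height width)

-- ===== LEMMAS AND PROOFS =====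

theorem omLoop1_eq (n : Nat) : ∀ (height Neo : Int), (height - Neo).toNat = n →
    omLoop1 n height Neo = List.replicate n ([] : List Int) := by
  induction n with
  | zero => intro height Neo h; rfl
  | succ n ih =>
    intro height Neo h
    rw [omLoop1, if_pos (by omega)]
    rw [ih height (Neo + 1) (by omega)]
    rfl

theorem omLoop3_eq (n : Nat) : ∀ (width TAA Number : Int) (rowRev : List Int),
    (width - TAA).toNat = n →
    omLoop3 n width TAA Number rowRev =
      (rowRev.reverse ++ (List.range n).map (fun c : Nat => Number + (c : Int)),
        Number + (n : Int)) := by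
  induction n with
  | zero =>
    intro width TAA Number rowRev h
    simp [omLoop3]
  | succ n ih =>
    intro width TAA Number rowRev h
    rw [omLoop3, if_pos (by omega)]
    rw [ih width (TAA + 1) (Number + 1) (Number :: rowRev) (by omega)]
    have h1 : (List.range (n + 1)).map (fun c : Nat => Number + (c : Int)) =
        Number :: (List.range n).map (fun c : Nat => (Number + 1) + (c : Int)) := by
      rw [List.range_succ_eq_map, List.map_cons, List.map_map]
      simp only [Nat.cast_zero, add_zero]
      congr 1
      apply List.map_congr_left
      intro a _
      simp only [Function.comp_apply, Nat.succ_eq_add_one]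
      push_cast
      ring
    rw [h1, List.reverse_cons]
    simp only [List.append_assoc, List.singleton_append, Prod.mk.injEq]
    exact ⟨trivial, by push_cast; ring⟩

theorem omLoop2_eq (n : Nat) : ∀ (height width Neo Number : Int) (done : List (List Int)),
    (height - Neo).toNat = n →
    omLoop2 n height width Neo Number done (List.replicate n ([] : List Int)) =
      done.reverse ++ (List.range n).map (fun r : Nat =>
        (List.range width.toNat).map (fun c : Nat =>
          Number + (r : Int) * (width.toNat : Int) + (c : Int))) := by
  induction n with
  | zero =>
    intro height width Neo Number done h
    simp [omLoop2]
  | succ n ih =>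
    intro height width Neo Number done h
    rw [List.replicate_succ, omLoop2, if_pos (by omega)]
    simp only [List.reverse_nil]
    rw [show ((width : Int) - 0).toNat = width.toNat by omega,
      omLoop3_eq width.toNat width 0 Number [] (by omega)]
    simp only [List.reverse_nil, List.nil_append]
    rw [ih height width (Neo + 1) (Number + (width.toNat : Int))
      (((List.range width.toNat).map (fun c : Nat => Number + (c : Int))) :: done) (by omega)]
    have h2 : (List.range (n + 1)).map (fun r : Nat =>
        (List.range width.toNat).map (fun c : Nat =>
          Number + (r : Int) * (width.toNat : Int) + (c : Int))) =
        ((List.range width.toNat).map (fun c : Nat => Number + (c : Int))) ::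
        (List.range n).map (fun r : Nat =>
          (List.range width.toNat).map (fun c : Nat =>
            (Number + (width.toNat : Int)) + (r : Int) * (width.toNat : Int) + (c : Int))) := by
      rw [List.range_succ_eq_map, List.map_cons, List.map_map]
      congr 1
      · apply List.map_congr_left
        intro c _
        push_cast
        ring
      · apply List.map_congr_left
        intro r _
        simp only [Function.comp_apply, Nat.succ_eq_add_one]
        apply List.map_congr_left
        intro c _
        push_cast
        ring
    rw [h2, List.reverse_cons]
    simp [List.append_assoc]

-- ===== VERDICT (by name: the statement is the Claim_ definition above) =====
theorem ordered_matrix_spec : Claim_equal_ordered_matrix := by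
  intro height width _
  unfold Spec_ordered_matrix ordered_matrix ordered_matrix_alt
  rw [show ((height : Int) - 0).toNat = height.toNat by omega,
    omLoop1_eq height.toNat height 0 (by omega)]
  rw [omLoop2_eq height.toNat height width 0 1 [] (by omega)]
  simp only [List.reverse_nil, List.nil_append]
  apply List.map_congr_left
  intro r _
  rw [PySem.List.pyRange_one]
  rw [show ((r : Int) * width + width + 1 - ((r : Int) * width + 1)).toNat = width.toNat by omega]
  by_cases hw : width ≤ 0
  · have hz : width.toNat = 0 := by omega
    simp [hz]
  · apply List.map_congr_left
    intro c _
    rw [Int.toNat_of_nonneg (by omega : (0:Int) ≤ width)]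
    ring
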